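-- pv_equiv track=rewrite | github.com/wawzysys/Algorithm | 力扣/4.28/3.py | find_zeros_positions
-- ===== SOURCE A (Python) =====
-- def find_zeros_positions(n):
--     positions = []
--     zero_count = 0
--     position = 0
--     while n:
--         if not n & 1:
--             positions.append(position)
--             zero_count += 1
--         n >>= 1
--         position += 1
--     return zero_count, positions
-- ===== SOURCE B (Python) =====
-- def find_zeros_positions(n):
--     if n == 0:
--         return 0, []
--     b = bin(n)[2:]
--     positions = [i for i, c in enumerate(reversed(b)) if c == '0']
--     return b.count('0'), positions
-- ===== Notes on version B (the rewrite author's own statement) =====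
-- stated objective: idiomatic
-- what changed: B replaces A's bit-shifting while-loop (mutating n and three accumulators) by building the binary string bin(n)[2:] once, counting zeros with str.count, and collecting zero positions by enumerating the reversed string.
import Mathlib
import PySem

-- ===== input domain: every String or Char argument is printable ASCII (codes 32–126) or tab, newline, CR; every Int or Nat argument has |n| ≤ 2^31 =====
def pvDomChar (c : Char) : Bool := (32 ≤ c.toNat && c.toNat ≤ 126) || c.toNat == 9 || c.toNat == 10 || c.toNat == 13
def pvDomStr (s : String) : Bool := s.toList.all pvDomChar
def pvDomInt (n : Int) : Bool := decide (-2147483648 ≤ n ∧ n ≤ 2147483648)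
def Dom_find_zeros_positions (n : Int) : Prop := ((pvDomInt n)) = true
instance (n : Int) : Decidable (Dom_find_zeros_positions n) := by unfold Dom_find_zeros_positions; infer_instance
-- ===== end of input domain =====

-- B builds the binary string once and derives count and positions from it, instead of A's
-- bit-shifting while-loop; same O(log n) cost, more idiomatic decomposition.


-- ===== PORT A =====
-- A's while-loop; under Pre_ (0 ≤ n) Python's 'n & 1' is m % 2 and 'n >>= 1' is m / 2 on m = n.toNat.
def pvLoopA (m : Nat) (position : Int) (positions : List Int) (zero_count : Int) : Int × List Int :=
  if m = 0 then (zero_count, positions)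
  else if m % 2 = 0 then
    pvLoopA (m / 2) (position + 1) (positions ++ [position]) (zero_count + 1)
  else
    pvLoopA (m / 2) (position + 1) positions zero_count
termination_by m
decreasing_by all_goals exact Nat.div_lt_self (Nat.pos_of_ne_zero (by assumption)) (by omega)

def find_zeros_positions (n : Int) : Int × List Int :=
  pvLoopA n.toNat 0 [] 0

-- ===== PORT B =====
-- bin(m)[2:] as a character list, MSB first (hand port of bin, exact for m > 0; bin(0)[2:] never reached).
def pvBinChars (m : Nat) : List Char :=
  if m = 0 then [] else pvBinChars (m / 2) ++ [if m % 2 = 1 then '1' else '0']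
termination_by m
decreasing_by exact Nat.div_lt_self (Nat.pos_of_ne_zero (by assumption)) (by omega)

def find_zeros_positions_alt (n : Int) : Int × List Int :=
  if n = 0 then (0, [])
  else
    let b := pvBinChars n.toNat
    let positions := (PySem.List.enumerate b.reverse).filterMap
      (fun p => if p.2 = '0' then some p.1 else none)
    ((b.count '0' : Int), positions)

-- ===== PRECONDITION & SPEC =====
-- Pre_ excludes negative n, on which A's while-loop never terminates (n >>= 1 stalls at -1).
def Pre_find_zeros_positions (n : Int) : Prop := 0 ≤ n
instance (n : Int) : Decidable (Pre_find_zeros_positions n) := by unfold Pre_find_zeros_positions; infer_instance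
def pvWitness_find_zeros_positions : Int := (44)

def Spec_find_zeros_positions (n : Int) (out : Int × List Int) : Prop := out = find_zeros_positions_alt n
instance (n : Int) (out : Int × List Int) : Decidable (Spec_find_zeros_positions n out) := by unfold Spec_find_zeros_positions; infer_instance

-- ===== CLAIM =====
def Claim_equal_find_zeros_positions : Prop := ∀ (n : Int), Dom_find_zeros_positions n → Pre_find_zeros_positions n → Spec_find_zeros_positions n (find_zeros_positions n)

-- ===== LEMMAS AND PROOFS =====

theorem pvLoopA_eq (m : Nat) : ∀ (pos : Int) (acc : List Int) (cnt : Int),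
    pvLoopA m pos acc cnt =
      (cnt + ((pvBinChars m).count '0' : Int),
       acc ++ (PySem.List.enumerate (pvBinChars m).reverse pos).filterMap
         (fun p => if p.2 = '0' then some p.1 else none)) := by
  induction m using Nat.strong_induction_on with
  | _ m ih =>
    intro pos acc cnt
    by_cases hm : m = 0
    · subst hm
      simp [pvLoopA, pvBinChars]
    · have hlt : m / 2 < m := Nat.div_lt_self (Nat.pos_of_ne_zero hm) (by omega)
      rw [pvLoopA, pvBinChars]
      simp only [hm, if_false]
      by_cases hpar : m % 2 = 0
      · have h1 : m % 2 ≠ 1 := by omega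
        simp only [hpar, if_true]
        rw [ih (m / 2) hlt (pos + 1) (acc ++ [pos]) (cnt + 1)]
        simp [PySem.List.enumerate_cons, List.count_append]
        omega
      · have h1 : m % 2 = 1 := by omega
        simp only [h1, if_true]
        rw [ih (m / 2) hlt (pos + 1) acc cnt]
        simp [PySem.List.enumerate_cons, List.count_append]

-- ===== VERDICT =====
theorem find_zeros_positions_spec : Claim_equal_find_zeros_positions := by
  intro n _hd hpre
  unfold Spec_find_zeros_positions find_zeros_positions find_zeros_positions_alt
  by_cases hn : n = 0
  · subst hn; simp [pvLoopA]
  · have hpos : n.toNat ≠ 0 := by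
      intro h
      have := Int.toNat_of_nonneg hpre
      omega
    simp only [hn, if_false]
    rw [pvLoopA_eq]
    simp
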